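-- pv_equiv track=rewrite | github.com/DexterHK/codons-Visualizer | backend/utils/codon_utils.py | is_comma_free
-- ===== SOURCE A (Python) =====
-- def word_length(code):
--     """Get word length of code."""
--     for word in code:
--         return len(word)
--     return 0
--
-- def is_comma_free(code) -> bool:
--     """Check if code is comma-free."""
--     if not code:
--         return False
--     L = word_length(code)
--     for u in code:
--         for v in code:
--             for r in range(1, L):
--                 candidate = u[r:] + v[:r]
--                 if candidate in code:
--                     return False
--     return True
-- ===== SOURCE B (Python) =====
-- def is_comma_free(code) -> bool:
--     """Check if code is comma-free."""
--     if not code: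
--         return False
--     L = len(code[0])
--     for r in range(1, L):
--         suffixes = {u[r:] for u in code}
--         prefixes = {v[:r] for v in code}
--         for w in code:
--             for i in range(len(w) + 1):
--                 if w[:i] in suffixes and w[i:] in prefixes:
--                     return False
--     return True
-- ===== Notes on version B (the rewrite author's own statement) =====
-- stated objective: alternative
-- what changed: Instead of pairing all (u,v) and scanning the whole code list for each candidate u[r:]+v[:r], B builds per-r hash sets of word suffixes and prefixes once and, for each word, tests each split point against those sets, removing both the pairwise loop and the inner list scan.
import Mathlib
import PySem

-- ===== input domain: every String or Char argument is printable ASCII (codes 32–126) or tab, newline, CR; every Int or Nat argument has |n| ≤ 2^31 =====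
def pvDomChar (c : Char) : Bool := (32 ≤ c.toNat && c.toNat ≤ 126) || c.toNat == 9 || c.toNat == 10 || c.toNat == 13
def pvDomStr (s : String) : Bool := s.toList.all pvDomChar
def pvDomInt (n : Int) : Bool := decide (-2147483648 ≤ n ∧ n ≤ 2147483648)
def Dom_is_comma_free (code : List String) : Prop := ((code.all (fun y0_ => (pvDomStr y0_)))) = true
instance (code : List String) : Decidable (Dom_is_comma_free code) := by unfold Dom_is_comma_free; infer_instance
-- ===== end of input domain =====

-- B replaces A's all-pairs candidate search (scanning the whole code list per candidate) with per-shift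
-- suffix/prefix sets tested at each split point of each word; return value only, no mutation.


-- ===== PORT A =====
def word_length (code : List String) : Int :=
  match code with
  | [] => 0
  | word :: _ => PySem.Str.len word

def is_comma_free (code : List String) : Bool :=
  if code.isEmpty then false
  else
    let L := word_length code
    !(code.any fun u => code.any fun v =>
        (PySem.List.pyRange 1 L).any fun r =>
          let candidate := PySem.List.slice u.toList (some r) none ++ PySem.List.slice v.toList none (some r)
          code.any fun w => w.toList == candidate)

-- ===== PORT B =====
def is_comma_free_alt (code : List String) : Bool :=
  match code with
  | [] => false
  | w0 :: _ =>
    let L := PySem.Str.len w0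
    !((PySem.List.pyRange 1 L).any fun r =>
        let suffixes : PySem.Set (List Char) :=
          PySem.Set.ofList (code.map fun u => PySem.List.slice u.toList (some r) none)
        let prefixes : PySem.Set (List Char) :=
          PySem.Set.ofList (code.map fun v => PySem.List.slice v.toList none (some r))
        code.any fun w =>
          (PySem.List.pyRange 0 (PySem.Str.len w + 1)).any fun i =>
            suffixes.contains (PySem.List.slice w.toList none (some i)) &&
            prefixes.contains (PySem.List.slice w.toList (some i) none))
-- ===== PRECONDITION & SPEC =====
def Spec_is_comma_free (code : List String) (out : Bool) : Prop := out = is_comma_free_alt code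
instance (code : List String) (out : Bool) : Decidable (Spec_is_comma_free code out) := by unfold Spec_is_comma_free; infer_instance

-- ===== CLAIM (what is proved, stated in full; the proofs are below) =====
def Claim_equal_is_comma_free : Prop := ∀ (code : List String), Dom_is_comma_free code → Spec_is_comma_free code (is_comma_free code)

-- ===== LEMMAS AND PROOFS =====

lemma any_eq_any (code : List String) (L : Int) :
    (code.any fun u => code.any fun v =>
        (PySem.List.pyRange 1 L).any fun r =>
          code.any fun w =>
            w.toList == PySem.List.slice u.toList (some r) none ++ PySem.List.slice v.toList none (some r))
    = ((PySem.List.pyRange 1 L).any fun r =>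
        code.any fun w =>
          (PySem.List.pyRange 0 (PySem.Str.len w + 1)).any fun i =>
            (PySem.Set.ofList (code.map fun u => PySem.List.slice u.toList (some r) none)).contains
                (PySem.List.slice w.toList none (some i)) &&
            (PySem.Set.ofList (code.map fun v => PySem.List.slice v.toList none (some r))).contains
                (PySem.List.slice w.toList (some i) none)) := by
  rw [Bool.eq_iff_iff]
  simp only [List.any_eq_true, beq_iff_eq, Bool.and_eq_true, PySem.Set.contains_iff,
    PySem.Set.mem_ofList, List.mem_map, PySem.List.mem_pyRange_one]
  constructor
  · rintro ⟨u, hu, v, hv, r, ⟨hr1, hr2⟩, w, hw, hweq⟩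
    have hr0 : (0:Int) ≤ r := by omega
    set a := PySem.List.slice u.toList (some r) none with ha
    set b := PySem.List.slice v.toList none (some r) with hb
    refine ⟨r, ⟨hr1, hr2⟩, w, hw, ((a.length : Int)), ⟨by positivity, ?_⟩, ⟨u, hu, ?_⟩, ⟨v, hv, ?_⟩⟩
    · have : w.toList.length = a.length + b.length := by rw [hweq]; simp
      rw [PySem.Str.len_eq]
      omega
    · rw [PySem.List.slice_to_natCast, hweq, List.take_left]
    · rw [PySem.List.slice_from_natCast, hweq, List.drop_left]
  · rintro ⟨r, ⟨hr1, hr2⟩, w, hw, i, ⟨hi0, hi1⟩, ⟨u, hu, hsu⟩, ⟨v, hv, hpv⟩⟩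
    refine ⟨u, hu, v, hv, r, ⟨hr1, hr2⟩, w, hw, ?_⟩
    rw [hsu, hpv, PySem.List.slice_to hi0 (xs := w.toList), PySem.List.slice_from (xs := w.toList) hi0,
      List.take_append_drop]

-- ===== VERDICT (by name: the statement is the Claim_ definition above) =====
theorem is_comma_free_spec : Claim_equal_is_comma_free := by
  intro code _
  show is_comma_free code = is_comma_free_alt code
  cases code with
  | nil => rfl
  | cons w0 rest =>
    simp only [is_comma_free, is_comma_free_alt, word_length, List.isEmpty_cons, ite_false,
      Bool.false_eq_true]
    rw [any_eq_any]
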